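-- pv_equiv track=rewrite | github.com/tblackwe/aoc-2025 | solutions/day-10/solution.py | build_matrix_part2
-- ===== SOURCE A (Python) =====
-- from typing import List, Tuple
--
-- def build_matrix_part2(targets: List[int], buttons: List[List[int]]) -> List[List[int]]:
--     """
--     Build augmented matrix [A | b] for Part 2 integer linear programming.
--
--     Args:
--         targets: Target values for each counter
--         buttons: List of button patterns
--
--     Returns:
--         Augmented matrix for solving Ax = b where x >= 0, x integer
--     """
--     num_counters = len(targets)
--     num_buttons = len(buttons)
--
--     matrix = []
--     for counter_idx in range(num_counters):
--         row = [0] * (num_buttons + 1)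
--
--         # Check which buttons increment this counter
--         for button_idx, button in enumerate(buttons):
--             if counter_idx in button:
--                 row[button_idx] = 1
--
--         # Augment with target value
--         row[num_buttons] = targets[counter_idx]
--         matrix.append(row)
--
--     return matrix
-- ===== SOURCE B (Python) =====
-- from typing import List
--
-- def build_matrix_part2(targets: List[int], buttons: List[List[int]]) -> List[List[int]]:
--     num_counters = len(targets)
--     num_buttons = len(buttons)
--     # zero matrix with the target already in the augmented column
--     matrix = [[0] * num_buttons + [t] for t in targets]
--     # set cells directly from each button's counter entries
--     for button_idx, button in enumerate(buttons):
--         for counter_idx in button: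
--             if 0 <= counter_idx < num_counters:
--                 matrix[counter_idx][button_idx] = 1
--     return matrix
-- ===== Notes on version B (the rewrite author's own statement) =====
-- stated objective: faster
-- what changed: Instead of scanning every button's entry list once per counter (membership test), B builds the zero matrix with targets up front and makes one pass over the buttons' entries, setting each referenced cell directly.
import Mathlib
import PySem

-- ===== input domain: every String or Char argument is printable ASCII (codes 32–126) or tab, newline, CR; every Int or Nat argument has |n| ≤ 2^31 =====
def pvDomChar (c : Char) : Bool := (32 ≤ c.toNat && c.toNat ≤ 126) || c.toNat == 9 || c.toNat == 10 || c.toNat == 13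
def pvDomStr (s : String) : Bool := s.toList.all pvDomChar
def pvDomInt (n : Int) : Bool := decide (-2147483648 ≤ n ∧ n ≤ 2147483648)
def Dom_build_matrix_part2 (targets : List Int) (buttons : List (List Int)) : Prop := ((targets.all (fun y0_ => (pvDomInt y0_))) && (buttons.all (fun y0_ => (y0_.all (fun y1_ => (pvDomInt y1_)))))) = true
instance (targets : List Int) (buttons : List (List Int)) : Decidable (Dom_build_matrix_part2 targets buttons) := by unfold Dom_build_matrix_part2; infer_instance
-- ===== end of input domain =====

-- B replaces A's per-counter membership scan over every button with a zero matrix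
-- filled by one pass over the buttons' entries (objective: faster, asymptotic).


-- ===== PORT A =====
def build_matrix_part2 (targets : List Int) (buttons : List (List Int)) : List (List Int) :=
  let num_counters := targets.length
  let num_buttons := buttons.length
  (PySem.List.pyRange 0 (num_counters : Int) 1).foldl (fun matrix counter_idx =>
    let row0 := List.replicate (num_buttons + 1) 0
    let row1 := (PySem.List.enumerate buttons 0).foldl (fun row jb =>
      if counter_idx ∈ jb.2 then PySem.List.pySetD row jb.1 1 else row) row0
    let row2 := PySem.List.pySetD row1 (num_buttons : Int) (PySem.List.pyGetD targets counter_idx 0)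
    matrix ++ [row2]) []

-- ===== PORT B =====
def build_matrix_part2_alt (targets : List Int) (buttons : List (List Int)) : List (List Int) :=
  let num_counters := targets.length
  let num_buttons := buttons.length
  let init := targets.map (fun t => List.replicate num_buttons 0 ++ [t])
  (PySem.List.enumerate buttons 0).foldl (fun matrix jb =>
    jb.2.foldl (fun matrix counter_idx =>
      if 0 ≤ counter_idx ∧ counter_idx < (num_counters : Int) then
        matrix.modify counter_idx.toNat (fun row => PySem.List.pySetD row jb.1 1)
      else matrix) matrix) init

-- ===== PRECONDITION & SPEC =====
def Spec_build_matrix_part2 (targets : List Int) (buttons : List (List Int)) (out : List (List Int)) : Prop := out = build_matrix_part2_alt targets buttons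
instance (targets : List Int) (buttons : List (List Int)) (out : List (List Int)) : Decidable (Spec_build_matrix_part2 targets buttons out) := by unfold Spec_build_matrix_part2; infer_instance

-- ===== CLAIM (what is proved, stated in full; the proofs are below) =====
def Claim_equal_build_matrix_part2 : Prop := ∀ (targets : List Int) (buttons : List (List Int)), Dom_build_matrix_part2 targets buttons → Spec_build_matrix_part2 targets buttons (build_matrix_part2 targets buttons)

-- ===== LEMMAS AND PROOFS =====

/-- cell accessor with defaults (default row `[]`, default entry `0`). -/
def pvCell (mat : List (List Int)) (i p : Nat) : Int := (mat.getD i []).getD p 0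

/-- the row A builds for counter `k`. -/
def pvRowA (targets : List Int) (buttons : List (List Int)) (k : Int) : List Int :=
  PySem.List.pySetD
    ((PySem.List.enumerate buttons 0).foldl (fun row jb =>
      if k ∈ jb.2 then PySem.List.pySetD row jb.1 1 else row)
      (List.replicate (buttons.length + 1) 0))
    (buttons.length : Int) (PySem.List.pyGetD targets k 0)

theorem pv_getD_set (l : List Int) (i j : Nat) (v d : Int) :
    (l.set i v).getD j d = if j = i ∧ i < l.length then v else l.getD j d := by
  simp only [List.getD_eq_getElem?_getD, List.getElem?_set]
  split_ifs with h1 h2 h3 h3 <;> simp_all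

theorem pv_getD_modify (l : List (List Int)) (i k : Nat) (f : List Int → List Int) :
    (l.modify i f).getD k [] = if i = k ∧ k < l.length then f (l.getD k []) else l.getD k [] := by
  simp only [List.getD_eq_getElem?_getD, List.getElem?_modify]
  split_ifs with h1 <;> rcases h : l[k]? with _ | r <;>
    simp_all [List.getElem?_eq_some_iff]

/-- the shared "shift the enumerate start by one" step of both cell-wise loop lemmas. -/
theorem pv_shift (x : Int) (b : List Int) (bs : List (List Int)) (s p L : Nat) (base : Int) :
    (if s + 1 ≤ p ∧ p - (s + 1) < bs.length ∧ p < L ∧ x ∈ bs.getD (p - (s + 1)) [] then (1 : Int)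
     else if x ∈ b ∧ p = s ∧ s < L then 1 else base)
    = if s ≤ p ∧ p - s < (b :: bs).length ∧ p < L ∧ x ∈ (b :: bs).getD (p - s) [] then 1
      else base := by
  rcases Nat.lt_trichotomy p s with h | h | h
  · rw [if_neg (by rintro ⟨h', _⟩; omega), if_neg (by rintro ⟨_, h', _⟩; omega),
      if_neg (by rintro ⟨h', _⟩; omega)]
  · subst h
    rw [if_neg (by rintro ⟨h', _⟩; omega)]
    simp only [Nat.sub_self, List.getD_cons_zero, List.length_cons]
    by_cases hx : x ∈ b <;> by_cases hL : p < L <;> simp [hx, hL]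
  · have hidx : (b :: bs).getD (p - s) [] = bs.getD (p - (s + 1)) [] := by
      rw [show p - s = (p - (s + 1)) + 1 from by omega, List.getD_cons_succ]
    rw [hidx]
    have hc : (s ≤ p ∧ p - s < (b :: bs).length ∧ p < L ∧ x ∈ bs.getD (p - (s + 1)) [])
        ↔ (s + 1 ≤ p ∧ p - (s + 1) < bs.length ∧ p < L ∧ x ∈ bs.getD (p - (s + 1)) []) := by
      constructor
      · rintro ⟨_, h2, h3, h4⟩; simp only [List.length_cons] at h2
        exact ⟨by omega, by omega, h3, h4⟩
      · rintro ⟨_, h2, h3, h4⟩; exact ⟨by omega, by simp only [List.length_cons]; omega, h3, h4⟩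
    simp only [hc]
    split_ifs with h1 h2 <;> first | rfl | (rcases h2 with ⟨_, h2', _⟩; omega)

/-- A's inner loop preserves the row length. -/
theorem pv_lenA_inner (x : Int) :
    ∀ (bs : List (List Int)) (s : Int) (row : List Int),
    ((PySem.List.enumerate bs s).foldl (fun row jb =>
      if x ∈ jb.2 then PySem.List.pySetD row jb.1 1 else row) row).length = row.length := by
  intro bs
  induction bs with
  | nil => intro s row; simp
  | cons b bs ih =>
    intro s row
    simp only [PySem.List.enumerate_cons, List.foldl_cons]
    rw [ih]
    split_ifs <;> simp

/-- A's inner loop over `enumerate buttons`, cell-wise. -/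
theorem pv_innerA (x d : Int) :
    ∀ (bs : List (List Int)) (s : Nat) (row : List Int) (p : Nat),
    ((PySem.List.enumerate bs (s : Int)).foldl (fun row jb =>
        if x ∈ jb.2 then PySem.List.pySetD row jb.1 1 else row) row).getD p d
      = if s ≤ p ∧ p - s < bs.length ∧ p < row.length ∧ x ∈ bs.getD (p - s) [] then 1
        else row.getD p d := by
  intro bs
  induction bs with
  | nil => intro s row p; simp
  | cons b bs ih =>
    intro s row p
    have hcast : ((s : Int) + 1) = ((s + 1 : Nat) : Int) := by push_cast; ring
    simp only [PySem.List.enumerate_cons, List.foldl_cons, hcast]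
    rw [ih (s + 1)]
    have hlen : (if x ∈ b then PySem.List.pySetD row (s : Int) 1 else row).length = row.length := by
      split_ifs <;> simp
    have hget : (if x ∈ b then PySem.List.pySetD row (s : Int) 1 else row).getD p d
        = if x ∈ b ∧ p = s ∧ s < row.length then 1 else row.getD p d := by
      by_cases hx : x ∈ b
      · simp only [hx, if_true, true_and, PySem.List.pySetD_natCast, pv_getD_set]
      · simp [hx]
    rw [hlen, hget, pv_shift]

/-- B's loops preserve the matrix length. -/
theorem pv_lenB_inner (j : Int) (nn : Nat) :
    ∀ (es : List Int) (mat : List (List Int)),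
    (es.foldl (fun matrix e =>
      if 0 ≤ e ∧ e < (nn : Int) then
        matrix.modify e.toNat (fun row => PySem.List.pySetD row j 1)
      else matrix) mat).length = mat.length := by
  intro es
  induction es with
  | nil => intro mat; simp
  | cons e es ih =>
    intro mat
    simp only [List.foldl_cons]
    rw [ih]
    split_ifs <;> simp

theorem pv_lenB_outer (nn : Nat) :
    ∀ (bs : List (List Int)) (s : Int) (mat : List (List Int)),
    ((PySem.List.enumerate bs s).foldl (fun matrix jb =>
      jb.2.foldl (fun matrix e =>
        if 0 ≤ e ∧ e < (nn : Int) then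
          matrix.modify e.toNat (fun row => PySem.List.pySetD row jb.1 1)
        else matrix) matrix) mat).length = mat.length := by
  intro bs
  induction bs with
  | nil => intro s mat; simp
  | cons b bs ih =>
    intro s mat
    simp only [PySem.List.enumerate_cons, List.foldl_cons]
    rw [ih, pv_lenB_inner]

/-- B's inner loop over one button's entries only rewrites row `i`'s column `j` to 1. -/
theorem pv_innerB (j nn : Nat) :
    ∀ (es : List Int) (mat : List (List Int)) (i : Nat), mat.length = nn → i < nn →
    (es.foldl (fun matrix e =>
        if 0 ≤ e ∧ e < (nn : Int) then
          matrix.modify e.toNat (fun row => PySem.List.pySetD row (j : Int) 1)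
        else matrix) mat).getD i []
      = if (i : Int) ∈ es then (mat.getD i []).set j 1 else mat.getD i [] := by
  intro es
  induction es with
  | nil => intro mat i h1 h2; simp
  | cons e es ih =>
    intro mat i h1 h2
    simp only [List.foldl_cons]
    by_cases hg : 0 ≤ e ∧ e < (nn : Int)
    · rw [if_pos hg,
        ih (mat.modify e.toNat (fun row => PySem.List.pySetD row (j : Int) 1)) i
          (by simp [h1]) h2,
        pv_getD_modify]
      simp only [PySem.List.pySetD_natCast]
      by_cases he : e = (i : Int)
      · subst he
        have hcond : ((i : Int).toNat = i ∧ i < mat.length) := ⟨by simp, by omega⟩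
        rw [if_pos hcond, if_pos (by simp : ((i : Nat) : Int) ∈ ((i : Nat) : Int) :: es)]
        split_ifs <;> simp [List.set_set]
      · have hne : ¬(e.toNat = i ∧ i < mat.length) := by
          rintro ⟨h', _⟩; exact he (by omega)
        rw [if_neg hne]
        have hmem : ((i : Int) ∈ e :: es) ↔ ((i : Int) ∈ es) := by
          simp only [List.mem_cons, or_iff_right_iff_imp]
          intro h'; exact absurd h'.symm he
        simp only [hmem]
    · rw [if_neg hg, ih mat i h1 h2]
      have he : e ≠ (i : Int) := by
        intro h'; subst h'
        exact hg ⟨by positivity, by exact_mod_cast h2⟩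
      have hmem : ((i : Int) ∈ e :: es) ↔ ((i : Int) ∈ es) := by
        simp only [List.mem_cons, or_iff_right_iff_imp]
        intro h'; exact absurd h'.symm he
      simp only [hmem]

/-- B's outer loop over `enumerate buttons`, cell-wise. -/
theorem pv_outerB (nn : Nat) :
    ∀ (bs : List (List Int)) (s : Nat) (mat : List (List Int)) (i p : Nat),
    mat.length = nn → i < nn →
    pvCell ((PySem.List.enumerate bs (s : Int)).foldl (fun matrix jb =>
        jb.2.foldl (fun matrix e =>
          if 0 ≤ e ∧ e < (nn : Int) then
            matrix.modify e.toNat (fun row => PySem.List.pySetD row jb.1 1)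
          else matrix) matrix) mat) i p
      = if s ≤ p ∧ p - s < bs.length ∧ p < (mat.getD i []).length ∧ (i : Int) ∈ bs.getD (p - s) []
        then 1 else pvCell mat i p := by
  intro bs
  induction bs with
  | nil => intro s mat i p h1 h2; simp [pvCell]
  | cons b bs ih =>
    intro s mat i p h1 h2
    have hcast : ((s : Int) + 1) = ((s + 1 : Nat) : Int) := by push_cast; ring
    simp only [PySem.List.enumerate_cons, List.foldl_cons, hcast]
    have hrow := pv_innerB s nn b mat i h1 h2
    set mat' := b.foldl (fun matrix e =>
        if 0 ≤ e ∧ e < (nn : Int) then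
          matrix.modify e.toNat (fun row => PySem.List.pySetD row ((s : Nat) : Int) 1)
        else matrix) mat with hmat'
    rw [ih (s + 1) mat' i p (by rw [hmat', pv_lenB_inner]; exact h1) h2]
    have hrowlen : (mat'.getD i []).length = (mat.getD i []).length := by
      rw [hmat', hrow]; split_ifs <;> simp
    have hcell : pvCell mat' i p =
        if (i : Int) ∈ b ∧ p = s ∧ s < (mat.getD i []).length then 1 else pvCell mat i p := by
      unfold pvCell
      rw [hmat', hrow]
      by_cases hib : (i : Int) ∈ b
      · simp only [hib, if_true, true_and, pv_getD_set]
      · simp [hib]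
    rw [hrowlen, hcell, pv_shift]

/-- `(replicate m 0 ++ [t]).getD p 0` in closed form. -/
theorem pv_getD_init_row (m p : Nat) (t : Int) :
    (List.replicate m (0 : Int) ++ [t]).getD p 0 = if p = m then t else 0 := by
  simp only [List.getD_eq_getElem?_getD, List.getElem?_append, List.length_replicate]
  rcases Nat.lt_trichotomy p m with h | h | h
  · rw [if_pos h, if_neg (by omega)]
    simp [h]
  · subst h
    rw [if_neg (by omega), if_pos rfl, Nat.sub_self]
    rfl
  · rw [if_neg (by omega), if_neg (by omega),
      show p - m = (p - m - 1) + 1 from by omega]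
    simp

/-- A as a `map` over the counters. -/
theorem pv_A_eq_map (targets : List Int) (buttons : List (List Int)) :
    build_matrix_part2 targets buttons
      = (List.range targets.length).map (fun k : Nat => pvRowA targets buttons (k : Int)) := by
  simp only [build_matrix_part2, pvRowA]
  rw [PySem.List.pyRange_zero_nat, List.foldl_map, PySem.List.foldl_append_singleton_eq_map,
    List.nil_append]

/-- A's row, cell-wise. -/
theorem pv_rowA_cell (targets : List Int) (buttons : List (List Int)) (k p : Nat) :
    (pvRowA targets buttons (k : Int)).getD p 0
      = if p = buttons.length then targets.getD k 0
        else if p < buttons.length ∧ (k : Int) ∈ buttons.getD p [] then 1 else 0 := by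
  unfold pvRowA
  rw [PySem.List.pySetD_natCast, PySem.List.pyGetD_natCast, pv_getD_set]
  have h0 := pv_innerA (k : Int) 0 buttons 0 (List.replicate (buttons.length + 1) 0) p
  simp only [Nat.cast_zero] at h0
  rw [h0, pv_lenA_inner]
  simp only [List.length_replicate, Nat.zero_le, true_and, Nat.sub_zero]
  have hrep : (List.replicate (buttons.length + 1) (0 : Int)).getD p 0 = 0 := by
    simp only [List.getD_eq_getElem?_getD]
    rcases h : (List.replicate (buttons.length + 1) (0 : Int))[p]? with _ | v
    · rfl
    · simp only [List.getElem?_replicate] at h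
      split_ifs at h
      simp_all
  rw [hrep]
  split_ifs <;> first | rfl | omega | tauto

theorem pv_rowA_len (targets : List Int) (buttons : List (List Int)) (k : Int) :
    (pvRowA targets buttons k).length = buttons.length + 1 := by
  unfold pvRowA
  rw [PySem.List.length_pySetD, pv_lenA_inner]
  simp

/-- B's loops preserve every row's length. -/
theorem pv_rowlenB_inner (j : Int) (nn : Nat) :
    ∀ (es : List Int) (mat : List (List Int)) (i : Nat),
    ((es.foldl (fun matrix e =>
      if 0 ≤ e ∧ e < (nn : Int) then
        matrix.modify e.toNat (fun row => PySem.List.pySetD row j 1)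
      else matrix) mat).getD i []).length = (mat.getD i []).length := by
  intro es
  induction es with
  | nil => intro mat i; rfl
  | cons e es ih =>
    intro mat i
    simp only [List.foldl_cons]
    rw [ih]
    split_ifs with hg
    · rw [pv_getD_modify]
      split_ifs <;> simp [PySem.List.length_pySetD]
    · rfl

theorem pv_rowlenB_outer (nn : Nat) :
    ∀ (bs : List (List Int)) (s : Int) (mat : List (List Int)) (i : Nat),
    (((PySem.List.enumerate bs s).foldl (fun matrix jb =>
      jb.2.foldl (fun matrix e =>
        if 0 ≤ e ∧ e < (nn : Int) then
          matrix.modify e.toNat (fun row => PySem.List.pySetD row jb.1 1)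
        else matrix) matrix) mat).getD i []).length = (mat.getD i []).length := by
  intro bs
  induction bs with
  | nil => intro s mat i; rfl
  | cons b bs ih =>
    intro s mat i
    simp only [PySem.List.enumerate_cons, List.foldl_cons]
    rw [ih, pv_rowlenB_inner]

theorem build_matrix_part2_spec : Claim_equal_build_matrix_part2 := by
  intro targets buttons _
  unfold Spec_build_matrix_part2
  rw [pv_A_eq_map]
  simp only [build_matrix_part2_alt]
  set n := targets.length with hn
  set m := buttons.length with hm
  set init := targets.map (fun t => List.replicate m 0 ++ [t]) with hinit
  have hinitlen : init.length = n := by simp [hinit, hn]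
  apply List.ext_getElem
  · rw [List.length_map, List.length_range]
    have h0 := pv_lenB_outer n buttons 0 init
    rw [h0, hinitlen]
  · intro i h1 h2
    rw [List.getElem_map, List.getElem_range]
    have hi : i < n := by simpa using h1
    have h3 : i < targets.length := by omega
    have hinitrow : init.getD i [] = List.replicate m 0 ++ [targets.getD i 0] := by
      rw [hinit, List.getD_eq_getElem _ _ (by simpa using h3), List.getElem_map,
        List.getD_eq_getElem _ _ h3]
    have hrowlenB : ((((PySem.List.enumerate buttons 0).foldl (fun matrix jb =>
        jb.2.foldl (fun matrix e =>
          if 0 ≤ e ∧ e < (n : Int) then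
            matrix.modify e.toNat (fun row => PySem.List.pySetD row jb.1 1)
          else matrix) matrix) init)).getD i []).length = m + 1 := by
      rw [pv_rowlenB_outer, hinitrow]
      simp
    rw [← List.getD_eq_getElem _ ([] : List Int) h2]
    apply List.ext_getElem
    · rw [pv_rowA_len, hrowlenB]
    · intro p hp1 hp2
      have hpm : p < m + 1 := by rw [pv_rowA_len] at hp1; exact hp1
      rw [← List.getD_eq_getElem _ (0 : Int) hp1, ← List.getD_eq_getElem _ (0 : Int) hp2,
        pv_rowA_cell]
      have hB := pv_outerB n buttons 0 init i p hinitlen hi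
      unfold pvCell at hB
      simp only [Nat.cast_zero] at hB
      rw [hB, hinitrow, pv_getD_init_row]
      simp only [Nat.sub_zero, Nat.zero_le, true_and, List.length_append,
        List.length_replicate, List.length_cons, List.length_nil]
      have hC : (p < m ∧ p < m + 1 ∧ (i : Int) ∈ buttons.getD p [])
          ↔ (p < m ∧ (i : Int) ∈ buttons.getD p []) := by
        constructor
        · rintro ⟨h4, _, h5⟩; exact ⟨h4, h5⟩
        · rintro ⟨h4, h5⟩; exact ⟨h4, by omega, h5⟩
      simp only [← hm, hC]
      by_cases hc2 : p < m ∧ (i : Int) ∈ buttons.getD p []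
      · rcases hc2 with ⟨h4, h5⟩
        simp only [List.getD_eq_getElem?_getD] at h5
        simp [h4, h5]
        intro h'
        exact absurd h' (by omega)
      · simp only [List.getD_eq_getElem?_getD] at hc2
        simp [hc2]
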